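-- pv_equiv track=rewrite | github.com/kmehran1106/HackerRank-Python | Easy/Manasa Stones/code_manasa_stones.py | manasa_stones
-- ===== SOURCE A (Python) =====
-- from typing import List
--
-- def manasa_stones(n: int, a: int, b: int) -> List[int]:
--     s = set()
--     for i in range(n):
--         x = a * (n - 1 -i) + b * i
--         s.add(x)
--     s = list(s)
--     s.sort()
--     return s
-- ===== SOURCE B (Python) =====
-- def manasa_stones(n, a, b):
--     # Generate the arithmetic progression of final values directly in sorted
--     # order instead of collecting into a set and sorting.
--     if n <= 0:
--         return []
--     if a == b:
--         return [a * (n - 1)]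
--     d = b - a
--     start = a * (n - 1)
--     vals = [start + i * d for i in range(n)]
--     return vals if d > 0 else vals[::-1]
-- ===== Notes on version B (the rewrite author's own statement) =====
-- stated objective: faster
-- what changed: B emits the arithmetic progression a*(n-1)+i*(b-a) directly in ascending (or reversed) order, replacing A's set accumulation plus sort.
import Mathlib
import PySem

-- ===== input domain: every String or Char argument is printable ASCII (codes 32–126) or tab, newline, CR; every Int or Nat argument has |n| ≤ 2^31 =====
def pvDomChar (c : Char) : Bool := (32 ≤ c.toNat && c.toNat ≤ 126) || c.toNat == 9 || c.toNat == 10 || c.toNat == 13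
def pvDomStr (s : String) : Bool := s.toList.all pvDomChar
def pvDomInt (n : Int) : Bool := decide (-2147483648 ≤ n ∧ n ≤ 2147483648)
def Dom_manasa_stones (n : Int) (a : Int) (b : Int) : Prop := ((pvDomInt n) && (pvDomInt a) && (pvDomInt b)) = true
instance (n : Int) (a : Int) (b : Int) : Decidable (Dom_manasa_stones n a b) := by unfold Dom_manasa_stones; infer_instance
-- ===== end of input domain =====

-- B replaces A's set-then-sort by emitting the arithmetic progression directly in order.

-- ===== PORT A =====
def manasa_stones (n : Int) (a : Int) (b : Int) : List Int :=
  let s : PySem.Set Int :=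
    (PySem.List.pyRange 0 n 1).foldl (fun s i => PySem.Set.add s (a * (n - 1 - i) + b * i)) PySem.Set.empty
  PySem.List.sorted s (fun x => x) false

-- ===== PORT B =====
def manasa_stones_alt (n : Int) (a : Int) (b : Int) : List Int :=
  if n ≤ 0 then []
  else if a = b then [a * (n - 1)]
  else
    let d := b - a
    let start := a * (n - 1)
    let vals := (PySem.List.pyRange 0 n 1).map (fun i => start + i * d)
    if d > 0 then vals else vals.reverse

-- ===== PRECONDITION & SPEC =====
def Spec_manasa_stones (n : Int) (a : Int) (b : Int) (out : List Int) : Prop := out = manasa_stones_alt n a b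
instance (n : Int) (a : Int) (b : Int) (out : List Int) : Decidable (Spec_manasa_stones n a b out) := by unfold Spec_manasa_stones; infer_instance

-- ===== CLAIM (what is proved, stated in full; the proofs are below) =====
def Claim_equal_manasa_stones : Prop := ∀ (n : Int) (a : Int) (b : Int), Dom_manasa_stones n a b → Spec_manasa_stones n a b (manasa_stones n a b)

-- ===== LEMMAS AND PROOFS =====

-- set(constant nonempty list) is a singleton
lemma ofList_map_const {α β : Type} [BEq α] [LawfulBEq α] (l : List β) (c : α) (h : l ≠ []) :
    PySem.Set.ofList (l.map (fun _ => c)) = [c] := by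
  induction l with
  | nil => exact absurd rfl h
  | cons x xs ih =>
    cases xs with
    | nil => rfl
    | cons y ys =>
      rw [List.map_cons, PySem.Set.ofList_cons, ih (by simp)]
      simp [PySem.Set.discard]

lemma manasa_A_eq_sorted_ofList (n a b : Int) :
    manasa_stones n a b =
      PySem.List.sorted (PySem.Set.ofList ((PySem.List.pyRange 0 n 1).map
        (fun i => a * (n - 1 - i) + b * i))) (fun x => x) false := by
  unfold manasa_stones
  rw [← PySem.Set.update_map_eq_foldl_add, PySem.Set.update_empty]

lemma f_eq_affine (n a b i : Int) : a * (n - 1 - i) + b * i = a * (n - 1) + i * (b - a) := by ring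

-- ===== VERDICT (by name: the statement is the Claim_ definition above) =====
theorem manasa_stones_spec : Claim_equal_manasa_stones := by
  intro n a b _
  show manasa_stones n a b = manasa_stones_alt n a b
  rw [manasa_A_eq_sorted_ofList]
  have hmap : (PySem.List.pyRange 0 n 1).map (fun i => a * (n - 1 - i) + b * i)
      = (PySem.List.pyRange 0 n 1).map (fun i => a * (n - 1) + i * (b - a)) := by
    apply List.map_congr_left; intro i _; exact f_eq_affine n a b i
  rw [hmap]
  unfold manasa_stones_alt
  by_cases hn : n ≤ 0
  · simp [hn, PySem.List.pyRange_one_eq_nil hn, PySem.List.sorted]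
  · simp only [if_neg hn]
    have hne : PySem.List.pyRange 0 n 1 ≠ [] := by
      rw [PySem.List.pyRange_one_cons (by omega)]; simp
    by_cases hab : a = b
    · subst hab
      simp only [if_pos]
      have : (PySem.List.pyRange 0 n 1).map (fun i => a * (n - 1) + i * (a - a))
          = (PySem.List.pyRange 0 n 1).map (fun _ => a * (n - 1)) := by
        apply List.map_congr_left; intro i _; ring
      rw [this, ofList_map_const _ _ hne]
      rfl
    · simp only [if_neg hab]
      set d := b - a with hd
      set vals := (PySem.List.pyRange 0 n 1).map (fun i => a * (n - 1) + i * d) with hv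
      have hd0 : d ≠ 0 := by omega
      have hnodup : vals.Nodup := by
        apply List.Nodup.map _ (PySem.List.nodup_pyRange_one 0 n)
        intro x y hxy
        dsimp only at hxy
        have : x * d = y * d := by linarith
        exact mul_right_cancel₀ hd0 this
      rw [PySem.Set.ofList_eq_self_of_nodup vals hnodup]
      by_cases hdp : d > 0
      · simp only [if_pos hdp]
        apply PySem.List.sorted_eq_self_of_pairwise
        rw [hv, List.pairwise_map]
        apply List.Pairwise.imp _ (PySem.List.pairwise_lt_pyRange_one 0 n)
        intro x y hxy
        have : x * d < y * d := mul_lt_mul_of_pos_right hxy hdp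
        linarith
      · simp only [if_neg hdp]
        apply PySem.List.sorted_eq_of_perm_of_pairwise_lt
        · exact (vals.reverse_perm)
        · rw [List.pairwise_reverse, hv, List.pairwise_map]
          apply List.Pairwise.imp _ (PySem.List.pairwise_lt_pyRange_one 0 n)
          intro x y hxy
          have hdn : d < 0 := by omega
          have : y * d < x * d := mul_lt_mul_of_neg_right hxy hdn
          linarith
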